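-- pv_equiv track=rewrite | github.com/mchandra452/CyberMahi | projects/AgentShield-Lab/AgentShield-Lab/defense/output_filter.py | filter_output
-- ===== SOURCE A (Python) =====
-- def filter_output(output: str) -> str:
--     """Mask sensitive keywords in the output string."""
--     if not isinstance(output, str):
--         return ""
--     # Example sensitive keywords to mask
--     sensitive_keywords = ["api_key", "password", "secret", "access_token"]
--     redacted = output
--     for keyword in sensitive_keywords:
--         redacted = redacted.replace(keyword, "[REDACTED]")
--     return redacted
-- ===== SOURCE B (Python) =====
-- def filter_output(output: str) -> str:
--     """Mask sensitive keywords in a single left-to-right pass."""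
--     if not isinstance(output, str):
--         return ""
--     keywords = ("api_key", "password", "secret", "access_token")
--     parts = []
--     i = 0
--     n = len(output)
--     while i < n:
--         for kw in keywords:
--             if output.startswith(kw, i):
--                 parts.append("[REDACTED]")
--                 i += len(kw)
--                 break
--         else:
--             parts.append(output[i])
--             i += 1
--     return "".join(parts)
-- ===== Notes on version B (the rewrite author's own statement) =====
-- stated objective: alternative
-- what changed: Replaces A's four sequential full-string .replace passes by one left-to-right scan that at each position matches any of the four keywords (safe because the keywords never overlap each other and '[REDACTED]' contains none of them).
import Mathlib
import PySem

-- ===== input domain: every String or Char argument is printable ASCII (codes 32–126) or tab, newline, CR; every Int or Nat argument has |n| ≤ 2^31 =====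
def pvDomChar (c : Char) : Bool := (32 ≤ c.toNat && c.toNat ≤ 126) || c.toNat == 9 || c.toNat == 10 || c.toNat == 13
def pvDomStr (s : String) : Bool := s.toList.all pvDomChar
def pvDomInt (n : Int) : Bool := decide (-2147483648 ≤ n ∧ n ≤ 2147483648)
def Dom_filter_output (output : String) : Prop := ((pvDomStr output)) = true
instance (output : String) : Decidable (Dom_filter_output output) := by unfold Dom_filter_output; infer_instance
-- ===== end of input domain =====

set_option maxRecDepth 2000

-- B replaces A's four sequential full-string .replace passes by one left-to-right scan
-- matching any of the four keywords at each position (objective: alternative; equal because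
-- the keywords never overlap each other and "[REDACTED]" contains none of them).

-- ===== PORT A =====
def filter_output (output : String) : String :=
  ["api_key", "password", "secret", "access_token"].foldl
    (fun redacted keyword => PySem.Str.replace redacted keyword "[REDACTED]") output

-- ===== PORT B =====
-- B-side helpers: the four keywords and the mask, as char lists
def pvK1 : List Char := ['a','p','i','_','k','e','y']
def pvK2 : List Char := ['p','a','s','s','w','o','r','d']
def pvK3 : List Char := ['s','e','c','r','e','t']
def pvK4 : List Char := ['a','c','c','e','s','s','_','t','o','k','e','n']
def pvRED : List Char := ['[','R','E','D','A','C','T','E','D',']']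

-- B's while-loop over the index i, as recursion over the remaining suffix
def pvScan : List Char → List Char
  | [] => []
  | c :: t =>
    if PySem.Chars.startswith (c :: t) pvK1 then pvRED ++ pvScan (List.drop pvK1.length (c :: t))
    else if PySem.Chars.startswith (c :: t) pvK2 then pvRED ++ pvScan (List.drop pvK2.length (c :: t))
    else if PySem.Chars.startswith (c :: t) pvK3 then pvRED ++ pvScan (List.drop pvK3.length (c :: t))
    else if PySem.Chars.startswith (c :: t) pvK4 then pvRED ++ pvScan (List.drop pvK4.length (c :: t))
    else c :: pvScan t
  termination_by l => l.length
  decreasing_by all_goals simp [pvK1, pvK2, pvK3, pvK4]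

def filter_output_alt (output : String) : String :=
  String.ofList (pvScan output.toList)

-- ===== PRECONDITION & SPEC =====
def Spec_filter_output (output : String) (out : String) : Prop := out = filter_output_alt output
instance (output : String) (out : String) : Decidable (Spec_filter_output output out) := by unfold Spec_filter_output; infer_instance

-- ===== CLAIM (what is proved, stated in full; the proofs are below) =====
def Claim_equal_filter_output : Prop := ∀ (output : String), Dom_filter_output output → Spec_filter_output output (filter_output output)

-- ===== LEMMAS AND PROOFS =====

-- structural version of PySem.Chars.replace (for a nonempty pattern)
def pvRep (old new : List Char) : List Char → List Char
  | [] => []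
  | c :: t =>
    if old.isPrefixOf (c :: t) && !old.isEmpty then
      new ++ pvRep old new (List.drop (old.length - 1) t)
    else c :: pvRep old new t
  termination_by l => l.length
  decreasing_by
    · simp only [List.length_drop, List.length_cons]; omega
    · simp

theorem pvGo_eq (old new : List Char) (hne : old ≠ []) :
    ∀ (fuel : Nat) (l acc : List Char), l.length ≤ fuel →
      PySem.Chars.replace.go old new fuel l acc = acc.reverse ++ pvRep old new l := by
  intro fuel
  induction fuel with
  | zero =>
    intro l acc hl
    have : l = [] := List.eq_nil_of_length_eq_zero (Nat.le_zero.mp hl)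
    subst this
    simp [PySem.Chars.replace.go, pvRep]
  | succ n ih =>
    intro l acc hl
    match l with
    | [] => simp [PySem.Chars.replace.go, pvRep]
    | c :: t =>
      rw [PySem.Chars.replace.go]
      by_cases hp : old.isPrefixOf (c :: t)
      · have hlen : 1 ≤ old.length := by
          cases old with
          | nil => exact absurd rfl hne
          | cons _ _ => simp
        rw [if_pos hp, ih _ _ (by simp at hl ⊢; omega)]
        have hdrop : List.drop old.length (c :: t) = List.drop (old.length - 1) t := by
          cases old with
          | nil => exact absurd rfl hne
          | cons o os => simp
        rw [hdrop]
        have : pvRep old new (c :: t)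
            = new ++ pvRep old new (List.drop (old.length - 1) t) := by
          rw [pvRep]
          simp [hp, hne]
        rw [this]
        simp
      · rw [if_neg hp, ih _ _ (by simp at hl ⊢; omega)]
        have : pvRep old new (c :: t) = c :: pvRep old new t := by
          rw [pvRep]; simp [hp]
        rw [this]
        simp

theorem pvReplace_eq (old new s : List Char) (hne : old ≠ []) :
    PySem.Chars.replace s old new = pvRep old new s := by
  rw [PySem.Chars.replace]
  rw [if_neg (by simp [hne])]
  rw [pvGo_eq old new hne s.length s [] (le_refl _)]
  simp

theorem pvRep_nil (old new : List Char) : pvRep old new [] = [] := by rw [pvRep]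

theorem pvRep_cons_neg {old : List Char} (new : List Char) {c : Char} {t : List Char}
    (h : old.isPrefixOf (c :: t) = false) :
    pvRep old new (c :: t) = c :: pvRep old new t := by
  rw [pvRep]; simp [h]

theorem pvRep_prefix {old : List Char} (new t : List Char) (hne : old ≠ []) :
    pvRep old new (old ++ t) = new ++ pvRep old new t := by
  match old, hne with
  | o :: os, _ =>
    show pvRep (o :: os) new (o :: (os ++ t)) = _
    rw [pvRep]
    rw [if_pos]
    · have : (o :: os).length - 1 = os.length := by simp
      rw [this, List.drop_left]
    · simp [List.isPrefixOf_iff_prefix]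

theorem pvRep_pass (old new p x : List Char) (hne : old ≠ [])
    (h : ∀ c ∈ p, old.head? ≠ some c) :
    pvRep old new (p ++ x) = p ++ pvRep old new x := by
  induction p with
  | nil => simp
  | cons c p' ih =>
    have hpre : old.isPrefixOf (c :: (p' ++ x)) = false := by
      cases old with
      | nil => exact absurd rfl hne
      | cons o os =>
        have : o ≠ c := by
          have := h c (by simp); simp at this; exact this
        simp [List.isPrefixOf, this]
    rw [List.cons_append, pvRep_cons_neg new hpre,
        ih (fun a ha => h a (by simp [ha]))]
    simp

theorem pvRep_decomp (old : List Char) (hne : old ≠ []) :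
    ∀ (n : Nat) (t : List Char), t.length ≤ n →
      pvRep old pvRED t = t ∨
      ∃ m X, m < t.length ∧ pvRep old pvRED t = t.take m ++ pvRED ++ X := by
  intro n
  induction n with
  | zero =>
    intro t ht
    left
    have : t = [] := List.eq_nil_of_length_eq_zero (Nat.le_zero.mp ht)
    subst this; exact pvRep_nil _ _
  | succ n ih =>
    intro t ht
    match t with
    | [] => left; exact pvRep_nil _ _
    | c :: t' =>
      by_cases hp : old.isPrefixOf (c :: t')
      · right
        refine ⟨0, pvRep old pvRED (List.drop (old.length - 1) t'), by simp, ?_⟩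
        rw [pvRep]
        simp [hp, hne]
      · rw [pvRep_cons_neg _ (by simp [hp])]
        rcases ih t' (by simp at ht; omega) with heq | ⟨m, X, hm, he⟩
        · left; rw [heq]
        · right
          exact ⟨m + 1, X, by simp; omega, by simp [he]⟩

-- if s has no '[' and is not a prefix of t, it is not a prefix of the masked t either
theorem pvNP {old s t : List Char} (hne : old ≠ [])
    (h1 : ¬ s <+: t) (h2 : '[' ∉ s) : ¬ s <+: pvRep old pvRED t := by
  rcases pvRep_decomp old hne t.length t (le_refl _) with heq | ⟨m, X, hm, he⟩
  · rw [heq]; exact h1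
  · rw [he]
    intro hs
    by_cases hl : s.length ≤ m
    · apply h1
      have h3 : s = (t.take m ++ (pvRED ++ X)).take s.length := by
        have := List.prefix_iff_eq_take.mp (by simpa using hs)
        simpa using this
      rw [List.take_append_of_le_length (by simp; omega)] at h3
      calc s = (t.take m).take s.length := h3
        _ <+: t.take m := List.take_prefix _ _
        _ <+: t := List.take_prefix _ _
    · apply h2
      have hs' : s = (t.take m ++ pvRED ++ X).take s.length :=
        List.prefix_iff_eq_take.mp hs
      have hm' : s[m]? = (t.take m ++ pvRED ++ X)[m]? := by
        rw [hs']
        rw [List.getElem?_take_of_lt (by omega)]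
      have hlen : (t.take m).length = m := by simp; omega
      have : (t.take m ++ pvRED ++ X)[m]? = some '[' := by
        rw [List.append_assoc, List.getElem?_append_right (by omega)]
        simp [hlen, pvRED]
      rw [this] at hm'
      exact List.mem_of_getElem? hm'

-- one masking pass cannot create a keyword occurrence at the scan head
theorem pvConsNP {old s t : List Char} {ch c : Char} (hne : old ≠ [])
    (h2 : '[' ∉ s) (h : ¬ (ch :: s) <+: (c :: t)) :
    ¬ (ch :: s) <+: (c :: pvRep old pvRED t) := by
  rw [List.cons_prefix_cons] at h ⊢
  rintro ⟨hc, hs⟩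
  by_cases hst : s <+: t
  · exact h ⟨hc, hst⟩
  · exact pvNP hne hst h2 hs

-- pvScan unfolding lemmas
theorem pvScan_nil : pvScan [] = [] := by rw [pvScan]

theorem pvScan_k1 (t : List Char) : pvScan (pvK1 ++ t) = pvRED ++ pvScan t := by
  show pvScan ('a'::'p'::'i'::'_'::'k'::'e'::'y'::t) = pvRED ++ pvScan t
  rw [pvScan]
  rw [if_pos (by rw [PySem.Chars.startswith_iff]; exact ⟨t, by simp [pvK1]⟩)]
  simp [pvK1]

theorem pvScan_k2 (t : List Char) : pvScan (pvK2 ++ t) = pvRED ++ pvScan t := by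
  show pvScan ('p'::'a'::'s'::'s'::'w'::'o'::'r'::'d'::t) = pvRED ++ pvScan t
  rw [pvScan]
  rw [if_neg (by simp [PySem.Chars.startswith_iff, pvK1, List.cons_prefix_cons])]
  rw [if_pos (by rw [PySem.Chars.startswith_iff]; exact ⟨t, by simp [pvK2]⟩)]
  simp [pvK2]

theorem pvScan_k3 (t : List Char) : pvScan (pvK3 ++ t) = pvRED ++ pvScan t := by
  show pvScan ('s'::'e'::'c'::'r'::'e'::'t'::t) = pvRED ++ pvScan t
  rw [pvScan]
  rw [if_neg (by simp [PySem.Chars.startswith_iff, pvK1, List.cons_prefix_cons])]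
  rw [if_neg (by simp [PySem.Chars.startswith_iff, pvK2, List.cons_prefix_cons])]
  rw [if_pos (by rw [PySem.Chars.startswith_iff]; exact ⟨t, by simp [pvK3]⟩)]
  simp [pvK3]

theorem pvScan_k4 (t : List Char) : pvScan (pvK4 ++ t) = pvRED ++ pvScan t := by
  show pvScan ('a'::'c'::'c'::'e'::'s'::'s'::'_'::'t'::'o'::'k'::'e'::'n'::t)
      = pvRED ++ pvScan t
  rw [pvScan]
  rw [if_neg (by simp [PySem.Chars.startswith_iff, pvK1, List.cons_prefix_cons])]
  rw [if_neg (by simp [PySem.Chars.startswith_iff, pvK2, List.cons_prefix_cons])]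
  rw [if_neg (by simp [PySem.Chars.startswith_iff, pvK3, List.cons_prefix_cons])]
  rw [if_pos (by rw [PySem.Chars.startswith_iff]; exact ⟨t, by simp [pvK4]⟩)]
  simp [pvK4]

theorem pvScan_cons_neg {c : Char} {t : List Char}
    (h1 : ¬ pvK1 <+: (c :: t)) (h2 : ¬ pvK2 <+: (c :: t))
    (h3 : ¬ pvK3 <+: (c :: t)) (h4 : ¬ pvK4 <+: (c :: t)) :
    pvScan (c :: t) = c :: pvScan t := by
  rw [pvScan]
  rw [if_neg (by simp [PySem.Chars.startswith_iff, h1])]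
  rw [if_neg (by simp [PySem.Chars.startswith_iff, h2])]
  rw [if_neg (by simp [PySem.Chars.startswith_iff, h3])]
  rw [if_neg (by simp [PySem.Chars.startswith_iff, h4])]

-- the keyword cross-occurrence facts: an earlier keyword never matches inside a later one
theorem pvCross_1_2 (x : List Char) :
    pvRep pvK1 pvRED (pvK2 ++ x) = pvK2 ++ pvRep pvK1 pvRED x := by
  show pvRep pvK1 pvRED ('p'::'a'::'s'::'s'::'w'::'o'::'r'::'d'::x) = _
  rw [pvRep_cons_neg _ (by simp [pvK1, List.isPrefixOf])]
  rw [pvRep_cons_neg _ (by simp [pvK1, List.isPrefixOf])]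
  have hp := pvRep_pass pvK1 pvRED ['s','s','w','o','r','d'] x (by decide) (by simp [pvK1])
  simp only [List.cons_append, List.nil_append] at hp
  rw [hp]
  simp [pvK2]

theorem pvCross_1_4 (x : List Char) :
    pvRep pvK1 pvRED (pvK4 ++ x) = pvK4 ++ pvRep pvK1 pvRED x := by
  show pvRep pvK1 pvRED ('a'::'c'::'c'::'e'::'s'::'s'::'_'::'t'::'o'::'k'::'e'::'n'::x) = _
  rw [pvRep_cons_neg _ (by simp [pvK1, List.isPrefixOf])]
  have hp := pvRep_pass pvK1 pvRED ['c','c','e','s','s','_','t','o','k','e','n'] x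
    (by decide) (by simp [pvK1])
  simp only [List.cons_append, List.nil_append] at hp
  rw [hp]
  simp [pvK4]

theorem pvCross_3_4 (x : List Char) :
    pvRep pvK3 pvRED (pvK4 ++ x) = pvK4 ++ pvRep pvK3 pvRED x := by
  show pvRep pvK3 pvRED ('a'::'c'::'c'::'e'::'s'::'s'::'_'::'t'::'o'::'k'::'e'::'n'::x) = _
  rw [pvRep_cons_neg _ (by simp [pvK3, List.isPrefixOf])]
  rw [pvRep_cons_neg _ (by simp [pvK3, List.isPrefixOf])]
  rw [pvRep_cons_neg _ (by simp [pvK3, List.isPrefixOf])]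
  rw [pvRep_cons_neg _ (by simp [pvK3, List.isPrefixOf])]
  rw [pvRep_cons_neg _ (by simp [pvK3, List.isPrefixOf])]
  rw [pvRep_cons_neg _ (by simp [pvK3, List.isPrefixOf])]
  have hp := pvRep_pass pvK3 pvRED ['_','t','o','k','e','n'] x (by decide) (by simp [pvK3])
  simp only [List.cons_append, List.nil_append] at hp
  rw [hp]
  simp [pvK4]

theorem pvChain_eq_scan :
    ∀ (n : Nat) (l : List Char), l.length ≤ n →
      pvRep pvK4 pvRED (pvRep pvK3 pvRED (pvRep pvK2 pvRED (pvRep pvK1 pvRED l)))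
        = pvScan l := by
  intro n
  induction n with
  | zero =>
    intro l hl
    have : l = [] := List.eq_nil_of_length_eq_zero (Nat.le_zero.mp hl)
    subst this
    simp [pvRep_nil, pvScan_nil]
  | succ n ih =>
    intro l hl
    match l with
    | [] => simp [pvRep_nil, pvScan_nil]
    | c :: t =>
      by_cases h1 : pvK1 <+: (c :: t)
      · obtain ⟨t', ht'⟩ := h1
        rw [← ht'] at hl ⊢
        rw [pvRep_prefix _ _ (by decide),
            pvRep_pass _ _ _ _ (by decide) (by simp [pvRED, pvK1, pvK2, pvK3, pvK4]), pvRep_pass _ _ _ _ (by decide) (by simp [pvRED, pvK1, pvK2, pvK3, pvK4]),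
            pvRep_pass _ _ _ _ (by decide) (by simp [pvRED, pvK1, pvK2, pvK3, pvK4]), pvScan_k1,
            ih t' (by simp [pvK1] at hl; omega)]
      · by_cases h2 : pvK2 <+: (c :: t)
        · obtain ⟨t', ht'⟩ := h2
          rw [← ht'] at hl ⊢
          rw [pvCross_1_2, pvRep_prefix _ _ (by decide),
              pvRep_pass _ _ _ _ (by decide) (by simp [pvRED, pvK1, pvK2, pvK3, pvK4]), pvRep_pass _ _ _ _ (by decide) (by simp [pvRED, pvK1, pvK2, pvK3, pvK4]),
              pvScan_k2, ih t' (by simp [pvK2] at hl; omega)]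
        · by_cases h3 : pvK3 <+: (c :: t)
          · obtain ⟨t', ht'⟩ := h3
            rw [← ht'] at hl ⊢
            rw [pvRep_pass _ _ _ _ (by decide) (by simp [pvRED, pvK1, pvK2, pvK3, pvK4]), pvRep_pass _ _ _ _ (by decide) (by simp [pvRED, pvK1, pvK2, pvK3, pvK4]),
                pvRep_prefix _ _ (by decide), pvRep_pass _ _ _ _ (by decide) (by simp [pvRED, pvK1, pvK2, pvK3, pvK4]),
                pvScan_k3, ih t' (by simp [pvK3] at hl; omega)]
          · by_cases h4 : pvK4 <+: (c :: t)
            · obtain ⟨t', ht'⟩ := h4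
              rw [← ht'] at hl ⊢
              rw [pvCross_1_4, pvRep_pass _ _ _ _ (by decide) (by simp [pvRED, pvK1, pvK2, pvK3, pvK4]), pvCross_3_4,
                  pvRep_prefix _ _ (by decide),
                  pvScan_k4, ih t' (by simp [pvK4] at hl; omega)]
            · -- no keyword matches at this position
              have n2 : ¬ pvK2 <+: (c :: pvRep pvK1 pvRED t) :=
                pvConsNP (by decide) (by simp) h2
              have n3 : ¬ pvK3 <+: (c :: pvRep pvK2 pvRED (pvRep pvK1 pvRED t)) :=
                pvConsNP (by decide) (by simp)
                  (pvConsNP (by decide) (by simp) h3)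
              have n4 : ¬ pvK4 <+: (c :: pvRep pvK3 pvRED (pvRep pvK2 pvRED (pvRep pvK1 pvRED t))) :=
                pvConsNP (by decide) (by simp)
                  (pvConsNP (by decide) (by simp)
                    (pvConsNP (by decide) (by simp) h4))
              rw [pvRep_cons_neg _ (by simp only [Bool.eq_false_iff, ne_eq, List.isPrefixOf_iff_prefix]; exact h1),
                  pvRep_cons_neg _ (by simp only [Bool.eq_false_iff, ne_eq, List.isPrefixOf_iff_prefix]; exact n2),
                  pvRep_cons_neg _ (by simp only [Bool.eq_false_iff, ne_eq, List.isPrefixOf_iff_prefix]; exact n3),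
                  pvRep_cons_neg _ (by simp only [Bool.eq_false_iff, ne_eq, List.isPrefixOf_iff_prefix]; exact n4),
                  pvScan_cons_neg h1 h2 h3 h4,
                  ih t (by simp at hl; omega)]

-- ===== VERDICT (by name: the statement is the Claim_ definition above) =====
theorem filter_output_spec : Claim_equal_filter_output := by
  intro output _
  show filter_output output = filter_output_alt output
  rw [filter_output, filter_output_alt]
  simp only [List.foldl_cons, List.foldl_nil]
  rw [PySem.Str.replace, PySem.Str.replace, PySem.Str.replace, PySem.Str.replace]
  simp only [String.toList_ofList]
  rw [show ("api_key" : String).toList = pvK1 from rfl,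
      show ("password" : String).toList = pvK2 from rfl,
      show ("secret" : String).toList = pvK3 from rfl,
      show ("access_token" : String).toList = pvK4 from rfl,
      show ("[REDACTED]" : String).toList = pvRED from rfl]
  rw [pvReplace_eq _ _ _ (by decide), pvReplace_eq _ _ _ (by decide),
      pvReplace_eq _ _ _ (by decide), pvReplace_eq _ _ _ (by decide)]
  rw [pvChain_eq_scan output.toList.length output.toList (le_refl _)]
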